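-- pv_equiv track=rewrite | github.com/alex-zach/advent_of_code | src/challenges/day3/main.py | _duplicate_item_type
-- ===== SOURCE A (Python) =====
-- def _duplicate_item_type(comps):
--     comp_maps = [dict()]
--
--     for c in [*range(ord('a'), ord('z')+1), *range(ord('A'),ord('Z')+1)]:
--         comp_maps[0][chr(c)] = 0
--
--     for c in comps[0]:
--         comp_maps[0][c] += 1
--
--     for i in range(1,len(comps)):
--         comp_maps.append(dict())
--         for c in [*range(ord('a'), ord('z')+1), *range(ord('A'),ord('Z')+1)]:
--             comp_maps[i][chr(c)] = 0
--
--         for c in comps[i]: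
--             comp_maps[i][c] = min(comp_maps[i][c] + 1, comp_maps[i-1][c])
--
--     return comp_maps[-1]
-- ===== SOURCE B (Python) =====
-- def _duplicate_item_type(comps):
--     letters = [chr(c) for c in [*range(ord('a'), ord('z') + 1), *range(ord('A'), ord('Z') + 1)]]
--     return {ch: min(comp.count(ch) for comp in comps) for ch in letters}
-- ===== Notes on version B (the rewrite author's own statement) =====
-- stated objective: simpler
-- what changed: Replaces A's pipeline of per-compartment count dicts with a fused min-cap update by a single dict comprehension that, per letter, takes the min of str.count over all compartments (loop order swapped, no intermediate dicts).
import Mathlib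
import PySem

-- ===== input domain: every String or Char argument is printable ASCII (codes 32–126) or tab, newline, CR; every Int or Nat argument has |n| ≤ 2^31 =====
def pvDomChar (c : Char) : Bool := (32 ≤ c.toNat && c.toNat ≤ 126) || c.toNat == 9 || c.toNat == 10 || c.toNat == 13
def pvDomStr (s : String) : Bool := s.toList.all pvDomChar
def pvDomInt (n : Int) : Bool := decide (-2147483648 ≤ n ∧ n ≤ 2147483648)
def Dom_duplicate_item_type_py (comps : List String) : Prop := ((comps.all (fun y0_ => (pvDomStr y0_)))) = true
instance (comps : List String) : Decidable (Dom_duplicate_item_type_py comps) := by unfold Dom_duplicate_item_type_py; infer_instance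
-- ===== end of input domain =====

-- B replaces A's pipeline of per-compartment count dicts (with a fused min-cap update) by a per-letter
-- min of str.count across the compartments — a simpler decomposition, equal on Pre_.

-- ===== PORT A =====
-- Python iteration over a string yields length-1 strings (the dict keys are such strings).
def pyStrItems (s : String) : List String := s.toList.map (fun c => String.ofList [c])

-- the letter-code list [*range(ord('a'), ord('z')+1), *range(ord('A'), ord('Z')+1)]
def dupACodes : List Int := PySem.List.pyRange 97 123 1 ++ PySem.List.pyRange 65 91 1

-- the zero-initialisation loop A performs for comp_maps[0] and for each comp_maps[i]
def dupAZero : PySem.Dict String Int :=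
  dupACodes.foldl (fun d c => d.insert (String.ofList [Char.ofNat c.toNat]) 0) PySem.Dict.empty

def duplicate_item_type_py (comps : List String) : List (String × Int) :=
  let m0 := (pyStrItems ((PySem.List.pyGet? comps 0).getD "")).foldl
      (fun d c => d.insert c (d.getD c 0 + 1)) dupAZero
  let comp_maps := (PySem.List.pyRange 1 (comps.length : Int) 1).foldl
      (fun cms i =>
        let prev := (PySem.List.pyGet? cms (i - 1)).getD PySem.Dict.empty
        let di := (pyStrItems ((PySem.List.pyGet? comps i).getD "")).foldl
            (fun d c => d.insert c (min (d.getD c 0 + 1) (prev.getD c 0))) dupAZero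
        cms ++ [di]) [m0]
  ((PySem.List.pyGet? comp_maps (-1)).getD PySem.Dict.empty).items

-- ===== PORT B =====
-- letters = [chr(c) for c in [*range(ord('a'), ord('z')+1), *range(ord('A'), ord('Z')+1)]]
def dupLetters : List String :=
  (PySem.List.pyRange 97 123 1 ++ PySem.List.pyRange 65 91 1).map
    (fun c => String.ofList [Char.ofNat c.toNat])

-- {ch: min(comp.count(ch) for comp in comps) for ch in letters}  (keys are the 52 distinct letters)
def duplicate_item_type_py_alt (comps : List String) : List (String × Int) :=
  dupLetters.map (fun ch =>
    (ch, (PySem.List.min? (comps.map (fun comp => (PySem.Str.count comp ch : Int)))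
            (fun x => x)).getD 0))

-- ===== PRECONDITION & SPEC =====
-- Pre_ excludes exactly the inputs where A raises: empty comps (IndexError on comps[0]) and any
-- non-(ASCII-letter) character (KeyError on the 52-letter dicts).
def Pre_duplicate_item_type_py (comps : List String) : Prop :=
  comps ≠ [] ∧ ∀ s ∈ comps,
    s.toList.all (fun c => (97 ≤ c.toNat && c.toNat ≤ 122) || (65 ≤ c.toNat && c.toNat ≤ 90)) = true
instance (comps : List String) : Decidable (Pre_duplicate_item_type_py comps) := by
  unfold Pre_duplicate_item_type_py; infer_instance

def pvWitness_duplicate_item_type_py : List String := ["ab", "b"]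

def Spec_duplicate_item_type_py (comps : List String) (out : List (String × Int)) : Prop :=
  out = duplicate_item_type_py_alt comps
instance (comps : List String) (out : List (String × Int)) : Decidable (Spec_duplicate_item_type_py comps out) := by
  unfold Spec_duplicate_item_type_py; infer_instance

-- ===== CLAIM (what is proved, stated in full; the proofs are below) =====
def Claim_equal_duplicate_item_type_py : Prop := ∀ (comps : List String), Dom_duplicate_item_type_py comps → Pre_duplicate_item_type_py comps → Spec_duplicate_item_type_py comps (duplicate_item_type_py comps)
-- ===== LEMMAS AND PROOFS =====

-- counting a single-character needle is counting the character
theorem dup_go_single (c : Char) (l : List Char) (fuel acc : Nat) (h : l.length ≤ fuel) :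
    PySem.Chars.count.go [c] fuel l acc = acc + l.count c := by
  induction l generalizing fuel acc with
  | nil => cases fuel <;> simp [PySem.Chars.count.go]
  | cons x t ih =>
      cases fuel with
      | zero => simp at h
      | succ n =>
        rw [PySem.Chars.count.go]
        simp only [List.isPrefixOf, List.count_cons]
        by_cases hc : c = x
        · subst hc
          simp [ih _ (acc + 1) (by simpa using h)]
          omega
        · simp [Ne.symm hc, hc, ih _ _ (by simpa using h)]

theorem dup_strCount_single (s : String) (c : Char) :
    PySem.Str.count s (String.ofList [c]) = s.toList.count c := by
  rw [PySem.Str.count_eq]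
  simp only [String.toList_ofList]
  rw [PySem.Chars.count, if_neg (by simp), dup_go_single c s.toList s.toList.length 0 le_rfl]
  exact Nat.zero_add _

theorem dup_items_count (s : String) (c : Char) :
    (pyStrItems s).count (String.ofList [c]) = s.toList.count c := by
  unfold pyStrItems
  exact List.count_map_of_injective s.toList (fun c => String.ofList [c])
    (fun a b hab => by simpa using congrArg String.toList hab) c

theorem dup_mem_dupLetters (c : Char)
    (h : (97 ≤ c.toNat ∧ c.toNat ≤ 122) ∨ (65 ≤ c.toNat ∧ c.toNat ≤ 90)) : String.ofList [c] ∈ dupLetters := by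
  unfold dupLetters
  refine List.mem_map.mpr ⟨(c.toNat : Int), ?_, by simp [Char.ofNat_toNat]⟩
  rcases h with ⟨h1, h2⟩ | ⟨h1, h2⟩
  · exact List.mem_append_left _ (PySem.List.mem_pyRange_one.mpr (by omega))
  · exact List.mem_append_right _ (PySem.List.mem_pyRange_one.mpr (by omega))

set_option maxRecDepth 100000 in
theorem dupLetters_nodup : dupLetters.Nodup := by decide

set_option maxRecDepth 100000 in
theorem dupAZero_keys : dupAZero.keys = dupLetters := by decide

set_option maxRecDepth 100000 in
theorem dupAZero_getD : ∀ ch ∈ dupLetters, dupAZero.getD ch 0 = 0 := by decide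

-- Set.update by elements already present is the identity
theorem dup_set_update_self (s : PySem.Set String) (l : List String)
    (h : ∀ x ∈ l, x ∈ s) : PySem.Set.update s l = s := by
  rw [PySem.Set.update_eq_append_filter]
  have hfil : (PySem.Set.ofList l).filter (fun y => !(PySem.Set.contains s y)) = [] := by
    apply List.filter_eq_nil_iff.mpr
    intro x hx
    have hxl : x ∈ l := by rw [PySem.Set.mem_ofList] at hx; exact hx
    simpa using h x hxl
  rw [hfil]
  simp

-- pointwise value of A's fused count-and-cap loop
theorem dup_getD_foldl_insert_min (p : PySem.Dict String Int) (l : List String)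
    (d : PySem.Dict String Int) (v : String) :
    (l.foldl (fun d c => d.insert c (min (d.getD c 0 + 1) (p.getD c 0))) d).getD v 0
      = if l.count v = 0 then d.getD v 0
        else min (d.getD v 0 + l.count v) (p.getD v 0) := by
  induction l generalizing d with
  | nil => simp
  | cons x t ih =>
      rw [List.foldl_cons, ih]
      simp only [PySem.Dict.getD_insert]
      by_cases hv : v = x
      · subst hv
        simp only [List.count_cons_self]
        rw [if_neg (Nat.succ_ne_zero _)]
        split_ifs with h1 <;> push_cast <;> omega
      · simp [hv, Ne.symm hv]

theorem dup_foldl_min_nonneg (l : List Int) (a : Int) (ha : 0 ≤ a)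
    (hl : ∀ x ∈ l, 0 ≤ x) : 0 ≤ l.foldl min a := by
  induction l generalizing a with
  | nil => simpa
  | cons x t ih =>
      exact ih _ (le_min ha (hl x (by simp))) (fun y hy => hl y (by simp [hy]))

-- the value B computes for letter ch after the first k+1 compartments s0 :: rest.take k
def dupMin (s0 : String) (rest : List String) (k : Nat) (ch : String) : Int :=
  ((rest.take k).map (fun s => ((pyStrItems s).count ch : Int))).foldl min
    ((pyStrItems s0).count ch)

theorem dupMin_nonneg (s0 : String) (rest : List String) (k : Nat) (ch : String) :
    0 ≤ dupMin s0 rest k ch := by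
  apply dup_foldl_min_nonneg
  · positivity
  · intro x hx
    rcases List.mem_map.mp hx with ⟨s, _, rfl⟩
    positivity

theorem dupMin_succ (s0 : String) (rest : List String) (k : Nat) (hk : k < rest.length)
    (ch : String) :
    dupMin s0 rest (k + 1) ch = min (dupMin s0 rest k ch) ((pyStrItems rest[k]).count ch : Int) := by
  unfold dupMin
  rw [List.take_add_one, List.getElem?_eq_getElem hk, Option.toList_some, List.map_append,
    List.foldl_append]
  simp only [List.map_cons, List.map_nil, List.foldl_cons, List.foldl_nil]

-- A's outer loop step (definitionally the lambda in the port)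
def dupStep (comps : List String) (cms : List (PySem.Dict String Int)) (i : Int) :
    List (PySem.Dict String Int) :=
  let prev := (PySem.List.pyGet? cms (i - 1)).getD PySem.Dict.empty
  let di := (pyStrItems ((PySem.List.pyGet? comps i).getD "")).foldl
      (fun d c => d.insert c (min (d.getD c 0 + 1) (prev.getD c 0))) dupAZero
  cms ++ [di]

-- keys stay the 52 letters and values stay the running min through one min-cap loop
theorem dup_keys_after (prev : PySem.Dict String Int) (s : String)
    (hs : ∀ c ∈ s.toList, ((97 ≤ c.toNat ∧ c.toNat ≤ 122) ∨ (65 ≤ c.toNat ∧ c.toNat ≤ 90))) :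
    ((pyStrItems s).foldl
      (fun d c => d.insert c (min (d.getD c 0 + 1) (prev.getD c 0))) dupAZero).keys = dupLetters := by
  rw [PySem.Dict.keys_foldl_insert, dupAZero_keys]
  apply dup_set_update_self
  intro x hx
  rcases List.mem_map.mp hx with ⟨c, hc, rfl⟩
  exact dup_mem_dupLetters c (hs c hc)

-- invariant of A's outer fold
theorem dup_outer_inv (s0 : String) (rest : List String)
    (hpre : ∀ s ∈ (s0 :: rest), ∀ c ∈ s.toList, ((97 ≤ c.toNat ∧ c.toNat ≤ 122) ∨ (65 ≤ c.toNat ∧ c.toNat ≤ 90)))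
    (m0 : PySem.Dict String Int)
    (hm0keys : m0.keys = dupLetters)
    (hm0 : ∀ ch ∈ dupLetters, m0.getD ch 0 = ((pyStrItems s0).count ch : Int)) :
    ∀ k : Nat, k ≤ rest.length →
      ∃ dk : PySem.Dict String Int,
        ((PySem.List.pyRange 1 ((k : Int) + 1) 1).foldl (dupStep (s0 :: rest)) [m0]).length = k + 1 ∧
        ((PySem.List.pyRange 1 ((k : Int) + 1) 1).foldl (dupStep (s0 :: rest)) [m0])[k]? = some dk ∧
        dk.keys = dupLetters ∧
        ∀ ch ∈ dupLetters, dk.getD ch 0 = dupMin s0 rest k ch := by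
  intro k
  induction k with
  | zero =>
      intro _
      have hr : PySem.List.pyRange 1 (((0 : Nat) : Int) + 1) 1 = [] := by
        apply PySem.List.pyRange_one_eq_nil
        norm_num
      refine ⟨m0, by rw [hr]; rfl, by rw [hr]; rfl, hm0keys, ?_⟩
      intro ch hch
      simpa [dupMin] using hm0 ch hch
  | succ k ih =>
      intro hk
      obtain ⟨dk, hlen, hget, hkeys, hval⟩ := ih (Nat.le_of_succ_le hk)
      have hk' : k < rest.length := hk
      have hcast : (((k + 1 : Nat) : Int) + 1) = ((k : Int) + 1) + 1 := by push_cast; ring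
      rw [hcast, PySem.List.pyRange_one_succ_right (by omega), List.foldl_append]
      set cms := (PySem.List.pyRange 1 ((k : Int) + 1) 1).foldl (dupStep (s0 :: rest)) [m0] with hcms
      have hprev : (PySem.List.pyGet? cms (((k : Int) + 1) - 1)).getD PySem.Dict.empty = dk := by
        have : ((k : Int) + 1) - 1 = (k : Nat) := by push_cast; ring
        rw [this, PySem.List.pyGet?_natCast, hget]
        rfl
      have hcomp : (PySem.List.pyGet? (s0 :: rest) ((k : Int) + 1)).getD "" = rest[k] := by
        have : ((k : Int) + 1) = ((k + 1 : Nat) : Int) := by push_cast; ring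
        rw [this, PySem.List.pyGet?_natCast]
        simp [List.getElem?_eq_getElem hk']
      refine ⟨(pyStrItems rest[k]).foldl
          (fun d c => d.insert c (min (d.getD c 0 + 1) (dk.getD c 0))) dupAZero, ?_, ?_, ?_, ?_⟩
      · simp only [List.foldl_cons, List.foldl_nil, dupStep, hprev, hcomp]
        simp [hlen]
      · simp only [List.foldl_cons, List.foldl_nil, dupStep, hprev, hcomp]
        rw [← hlen]
        exact List.getElem?_concat_length
      · exact dup_keys_after dk rest[k]
          (hpre rest[k] (List.mem_cons_of_mem _ (List.getElem_mem hk')))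
      · intro ch hch
        rw [dup_getD_foldl_insert_min, dupMin_succ s0 rest k hk' ch, hval ch hch]
        by_cases h0 : (pyStrItems rest[k]).count ch = 0
        · rw [if_pos h0, dupAZero_getD ch hch, h0]
          have := dupMin_nonneg s0 rest k ch
          push_cast
          omega
        · rw [if_neg h0, dupAZero_getD ch hch]
          omega

-- ===== VERDICT (by name: the statement is the Claim_ definition above) =====
theorem duplicate_item_type_py_spec : Claim_equal_duplicate_item_type_py := by
  intro comps _ hpre
  obtain ⟨hne, hall⟩ := hpre
  cases comps with
  | nil => exact absurd rfl hne
  | cons s0 rest =>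
      have hallP : ∀ s ∈ (s0 :: rest), ∀ c ∈ s.toList,
          ((97 ≤ c.toNat ∧ c.toNat ≤ 122) ∨ (65 ≤ c.toNat ∧ c.toNat ≤ 90)) := by
        intro s hs c hc
        have h := List.all_eq_true.mp (hall s hs) c hc
        simpa using h
      clear hall
      unfold Spec_duplicate_item_type_py duplicate_item_type_py duplicate_item_type_py_alt
      simp only []
      set n := rest.length with hn
      -- the first compartment
      have h0 : (PySem.List.pyGet? (s0 :: rest) 0).getD "" = s0 := by
        have := PySem.List.pyGet?_natCast (s0 :: rest) 0
        simpa using congrArg (Option.getD · "") this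
      set m0 := (pyStrItems ((PySem.List.pyGet? (s0 :: rest) 0).getD "")).foldl
          (fun d c => d.insert c (d.getD c 0 + 1)) dupAZero with hm0def
      have hm0keys : m0.keys = dupLetters := by
        rw [hm0def, PySem.Dict.keys_foldl_insert, dupAZero_keys]
        apply dup_set_update_self
        intro x hx
        rcases List.mem_map.mp hx with ⟨c, hc, rfl⟩
        rw [h0] at hc
        exact dup_mem_dupLetters c (hallP s0 (by simp) c hc)
      have hm0val : ∀ ch ∈ dupLetters, m0.getD ch 0 = ((pyStrItems s0).count ch : Int) := by
        intro ch hch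
        rw [hm0def, PySem.Dict.getD_foldl_insert_add_one, dupAZero_getD ch hch, h0]
        ring
      -- the outer loop
      have hfold : (PySem.List.pyRange 1 ((s0 :: rest).length : Int) 1).foldl
          (fun cms i =>
            let prev := (PySem.List.pyGet? cms (i - 1)).getD PySem.Dict.empty
            let di := (pyStrItems ((PySem.List.pyGet? (s0 :: rest) i).getD "")).foldl
                (fun d c => d.insert c (min (d.getD c 0 + 1) (prev.getD c 0))) dupAZero
            cms ++ [di]) [m0]
          = (PySem.List.pyRange 1 ((n : Int) + 1) 1).foldl (dupStep (s0 :: rest)) [m0] := by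
        have : ((s0 :: rest).length : Int) = (n : Int) + 1 := by simp [hn]
        rw [this]
        rfl
      rw [hfold]
      obtain ⟨dn, hlen, hget, hkeys, hval⟩ :=
        dup_outer_inv s0 rest hallP m0 hm0keys hm0val n le_rfl
      set cms := (PySem.List.pyRange 1 ((n : Int) + 1) 1).foldl (dupStep (s0 :: rest)) [m0] with hcms
      have hneg : PySem.List.pyGet? cms (-1) = cms[n]? := by
        rw [PySem.List.pyGet?, PySem.List.pyIdx?, hlen]
        norm_num
      rw [hneg, hget]
      have hitems : dn.items = dupLetters.map (fun ch => (ch, dn.getD ch 0)) := by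
        have hnd : dn.keys.Nodup := hkeys ▸ dupLetters_nodup
        rw [PySem.Dict.items_eq_map_keys dn hnd 0, hkeys]
      rw [Option.getD_some, hitems]
      apply List.map_congr_left
      intro ch hch
      rcases List.mem_map.mp hch with ⟨code, _, rfl⟩
      set c := Char.ofNat code.toNat with hc
      have hcnt : ∀ s : String, (PySem.Str.count s (String.ofList [c]) : Int)
          = ((pyStrItems s).count (String.ofList [c]) : Int) := by
        intro s
        rw [dup_strCount_single, dup_items_count]
      rw [hval _ hch]
      unfold dupMin
      rw [List.take_length]
      simp only [List.map_cons, PySem.List.min?_id_cons, Option.getD_some]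
      rw [hcnt s0]
      have hmap : List.map (fun comp => (PySem.Str.count comp (String.ofList [c]) : Int)) rest
          = List.map (fun s => ((pyStrItems s).count (String.ofList [c]) : Int)) rest :=
        List.map_congr_left (fun s _ => hcnt s)
      rw [hmap]
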